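-- pv_equiv track=rewrite | github.com/UWPCE-PythonCert-ClassRepos/Self_Paced-Online | students/nDruP/lesson04/trigram.py | build_trigram_dict
-- ===== SOURCE A (Python) =====
-- def build_trigram_dict(parsed_text):
--     """
--     Build trigrams from parsedtext.
--     1. Take 3 words
--     2. First 2 words are key, 3rd is value.
--     3. Return dict of trigrams.
--     Ignore multiple spaces/dashes.
--     """
--     trigram_dict = {}
--     key_word = [None, None]
--     ignore_char = [' ', '-']
--     word = ''
--     word_idx = 0
--     for x in parsed_text:
--         if x in ignore_char:
--             if word != '':
--                 if None in key_word:
--                     key_word[word_idx] = word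
--                     word_idx = word_idx + 1
--                 else:
--                     bigram = key_word[0] + ' ' + key_word[1]
--                     if not trigram_dict.get(bigram):
--                         trigram_dict[bigram] = [word]
--                     else:
--                         trigram_dict[bigram] += [word]
--                     key_word[0] = key_word[1]
--                     key_word[1] = word
--                 word = ''
--         else:
--             word += x
--     return trigram_dict
-- ===== SOURCE B (Python) =====
-- def build_trigram_dict(parsed_text):
--     """Two-phase rewrite: tokenize once (split on space/dash, drop the unfinished
--     trailing segment, skip empties), then slide a 3-word window with zip."""
--     words = [w for w in parsed_text.replace('-', ' ').split(' ')[:-1] if w]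
--     trigram_dict = {}
--     for w1, w2, w3 in zip(words, words[1:], words[2:]):
--         bigram = w1 + ' ' + w2
--         trigram_dict[bigram] = trigram_dict.get(bigram, []) + [w3]
--     return trigram_dict
-- ===== Notes on version B (the rewrite author's own statement) =====
-- stated objective: alternative
-- what changed: Replaces A's single-pass character state machine (partial word, two-slot key_word buffer, word_idx) by a two-phase computation: tokenize once with replace/split (dropping the unfinished trailing segment and empty segments), then build the dict by sliding a 3-word window with zip and get-with-default accumulation.
import Mathlib
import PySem

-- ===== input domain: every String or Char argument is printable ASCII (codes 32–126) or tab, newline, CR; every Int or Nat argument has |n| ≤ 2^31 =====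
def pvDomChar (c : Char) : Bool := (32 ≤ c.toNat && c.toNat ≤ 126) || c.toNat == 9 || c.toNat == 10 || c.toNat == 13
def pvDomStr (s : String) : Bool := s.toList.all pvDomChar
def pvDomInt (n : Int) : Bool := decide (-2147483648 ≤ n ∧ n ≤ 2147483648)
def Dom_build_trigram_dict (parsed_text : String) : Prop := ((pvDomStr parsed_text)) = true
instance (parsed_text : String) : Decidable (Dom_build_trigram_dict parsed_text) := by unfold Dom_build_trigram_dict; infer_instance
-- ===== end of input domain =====

-- B replaces A's one-pass char-by-char state machine by a two-phase computation
-- (tokenize once with replace/split, then slide a 3-word window with zip); same return value.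

-- ===== PORT A =====
-- one loop iteration of A; state: (dict, key_word[0], key_word[1], word_idx) paired with the
-- partial word — the Python list key_word = [None, None] is flattened into two Option fields
def pvStepA (st : PySem.Dict String (List String) × Option String × Option String × Int) (word : String)
    (x : Char) : (PySem.Dict String (List String) × Option String × Option String × Int) × String :=
  let (d, k1, k2, idx) := st
  if x = ' ' ∨ x = '-' then        -- x in ignore_char
    if word ≠ "" then
      if k1 = none ∨ k2 = none then  -- None in key_word
        -- key_word[word_idx] = word: word_idx here is 0 or 1 (it counts the filled slots,
        -- so word_idx ≥ 2 together with a None slot never occurs in A)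
        if idx = 0 then ((d, some word, k2, idx + 1), "")
        else ((d, k1, some word, idx + 1), "")
      else
        let bigram := k1.getD "" ++ " " ++ k2.getD ""
        -- `if not trigram_dict.get(bigram)`: get() is falsy iff the key is missing or holds []
        let d' := if (d.get? bigram).getD [] = [] then d.insert bigram [word]
                  else d.insert bigram ((d.get? bigram).getD [] ++ [word])
        ((d', k2, some word, idx), "")
    else ((d, k1, k2, idx), word)
  else ((d, k1, k2, idx), word.push x)

def build_trigram_dict (parsed_text : String) : List (String × List String) :=
  (parsed_text.toList.foldl (fun p x => pvStepA p.1 p.2 x)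
    ((PySem.Dict.empty, none, none, 0), "")).1.1.items

-- ===== PORT B =====
def build_trigram_dict_alt (parsed_text : String) : List (String × List String) :=
  -- words = [w for w in parsed_text.replace('-', ' ').split(' ')[:-1] if w]
  -- split(' ') never raises (the separator is nonempty), so split? is some; getD [] is its value
  let words := (PySem.List.slice
      ((PySem.Str.split? (PySem.Str.replace parsed_text "-" " ") " ").getD []) none (some (-1))).filter
      (fun w => decide (w ≠ ""))
  -- for w1, w2, w3 in zip(words, words[1:], words[2:]): d[bigram] = d.get(bigram, []) + [w3]
  (((words.zip ((PySem.List.slice words (some 1) none).zip (PySem.List.slice words (some 2) none))).foldl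
      (fun d t =>
        let bigram := t.1 ++ " " ++ t.2.1
        d.insert bigram (d.getD bigram [] ++ [t.2.2]))
      PySem.Dict.empty) : PySem.Dict String (List String)).items

-- ===== PRECONDITION & SPEC =====
def Spec_build_trigram_dict (parsed_text : String) (out : List (String × List String)) : Prop := out = build_trigram_dict_alt parsed_text
instance (parsed_text : String) (out : List (String × List String)) : Decidable (Spec_build_trigram_dict parsed_text out) := by unfold Spec_build_trigram_dict; infer_instance

-- ===== CLAIM (what is proved, stated in full; the proofs are below) =====
def Claim_equal_build_trigram_dict : Prop := ∀ (parsed_text : String), Dom_build_trigram_dict parsed_text → Spec_build_trigram_dict parsed_text (build_trigram_dict parsed_text)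

-- ===== LEMMAS AND PROOFS =====

-- the completed words of cs given the partial word w already read (A's word-boundary rule:
-- a word only counts once a separator follows it)
def pvToks (w : List Char) : List Char → List String
  | [] => []
  | c :: t =>
    if c = ' ' ∨ c = '-' then (if w = [] then pvToks [] t else String.ofList w :: pvToks [] t)
    else pvToks (w ++ [c]) t

-- split-on-single-space in accumulator form (the spec of Chars.splitOn.go at sep = [' '])
def pvSp (w : List Char) : List Char → List (List Char)
  | [] => [w]
  | c :: t => if c = ' ' then w :: pvSp [] t else pvSp (w ++ [c]) t

def pvUpd (d : PySem.Dict String (List String)) (a b w : String) : PySem.Dict String (List String) :=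
  let bigram := a ++ " " ++ b
  d.insert bigram (d.getD bigram [] ++ [w])

-- the sliding 3-word window, as a recursion both folds are reduced to
def pvWin (d : PySem.Dict String (List String)) : List String → PySem.Dict String (List String)
  | a :: b :: c :: t => pvWin (pvUpd d a b c) (b :: c :: t)
  | _ => d

-- word-level machine of A (the body of A's separator branch, one completed word at a time)
def pvWStep (st : PySem.Dict String (List String) × Option String × Option String × Int) (word : String) :
    PySem.Dict String (List String) × Option String × Option String × Int :=
  let (d, k1, k2, idx) := st
  if k1 = none ∨ k2 = none then
    if idx = 0 then (d, some word, k2, idx + 1) else (d, k1, some word, idx + 1)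
  else
    let bigram := k1.getD "" ++ " " ++ k2.getD ""
    let d' := if (d.get? bigram).getD [] = [] then d.insert bigram [word]
              else d.insert bigram ((d.get? bigram).getD [] ++ [word])
    (d', k2, some word, idx)

-- A's falsy-get update coincides with B's get-with-default update
theorem pvUpdA_eq (d : PySem.Dict String (List String)) (bg w : String) :
    (if (d.get? bg).getD [] = [] then d.insert bg [w]
     else d.insert bg ((d.get? bg).getD [] ++ [w])) = d.insert bg (d.getD bg [] ++ [w]) := by
  rw [PySem.Dict.getD]
  cases h : d.get? bg with
  | none => simp
  | some l => cases l <;> simp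

theorem pvCharFold_eq_wfold (cs : List Char) (st : PySem.Dict String (List String) × Option String × Option String × Int)
    (w : List Char) :
    (cs.foldl (fun p x => pvStepA p.1 p.2 x) (st, String.ofList w)).1 = (pvToks w cs).foldl pvWStep st := by
  induction cs generalizing st w with
  | nil => simp [pvToks]
  | cons c t ih =>
    obtain ⟨d, k1, k2, i⟩ := st
    rw [List.foldl_cons]
    by_cases hc : c = ' ' ∨ c = '-'
    · by_cases hw : w = []
      · subst hw
        rw [show pvStepA ((d, k1, k2, i), String.ofList []).1 ((d, k1, k2, i), String.ofList []).2 c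
            = ((d, k1, k2, i), String.ofList []) from by simp [pvStepA, hc]]
        rw [ih]
        simp [pvToks, hc]
      · have hw' : String.ofList w ≠ "" := by
          intro e
          apply hw
          simpa using congrArg String.toList e
        rw [show pvStepA ((d, k1, k2, i), String.ofList w).1 ((d, k1, k2, i), String.ofList w).2 c
            = (pvWStep (d, k1, k2, i) (String.ofList w), String.ofList []) from by
          simp only [pvStepA, pvWStep]
          rw [if_pos hc, if_pos hw']
          split
          · split <;> simp
          · simp]
        rw [ih]
        simp [pvToks, hc, hw]
    · rw [show pvStepA ((d, k1, k2, i), String.ofList w).1 ((d, k1, k2, i), String.ofList w).2 c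
          = ((d, k1, k2, i), String.ofList (w ++ [c])) from by
        simp only [pvStepA]
        rw [if_neg hc]
        simp [← String.toList_inj]]
      rw [ih]
      simp [pvToks, hc]

theorem pvWfold_some (l : List String) (d : PySem.Dict String (List String)) (a b : String) (i : Int) :
    (l.foldl pvWStep (d, some a, some b, i)).1 = pvWin d (a :: b :: l) := by
  induction l generalizing d a b with
  | nil => simp [pvWin]
  | cons c t ih =>
    rw [List.foldl_cons]
    show (t.foldl pvWStep (pvWStep (d, some a, some b, i) c)).1 = _
    rw [show pvWStep (d, some a, some b, i) c
        = ((if (d.get? (a ++ " " ++ b)).getD [] = [] then d.insert (a ++ " " ++ b) [c]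
            else d.insert (a ++ " " ++ b) ((d.get? (a ++ " " ++ b)).getD [] ++ [c])), some b, some c, i) from by
      simp [pvWStep]]
    rw [pvUpdA_eq]
    rw [ih]
    rfl

theorem pvWfold_start (l : List String) :
    (l.foldl pvWStep (PySem.Dict.empty, none, none, 0)).1 = pvWin PySem.Dict.empty l := by
  match l with
  | [] => rfl
  | [a] => rfl
  | a :: b :: t =>
    rw [List.foldl_cons, List.foldl_cons]
    rw [show pvWStep (PySem.Dict.empty, none, none, 0) a = (PySem.Dict.empty, some a, none, 1) from by
      simp [pvWStep]]
    rw [show pvWStep (PySem.Dict.empty, some a, none, 1) b = (PySem.Dict.empty, some a, some b, 2) from by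
      simp [pvWStep]]
    rw [pvWfold_some]

theorem pvZipFold_eq_win (ws : List String) (d : PySem.Dict String (List String)) :
    ((ws.zip ((ws.drop 1).zip (ws.drop 2))).foldl
      (fun d t =>
        let bigram := t.1 ++ " " ++ t.2.1
        d.insert bigram (d.getD bigram [] ++ [t.2.2])) d) = pvWin d ws := by
  induction d, ws using pvWin.induct with
  | case1 d a b c t ih =>
    show ((a, b, c) :: ((b :: c :: t).zip ((c :: t).zip t))).foldl _ d = _
    rw [List.foldl_cons]
    exact ih
  | case2 ws d h =>
    cases ws with
    | nil => rfl
    | cons a tl =>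
      cases tl with
      | nil => rfl
      | cons b tl2 =>
        cases tl2 with
        | nil => rfl
        | cons c tl3 => exact (h a b c tl3 rfl).elim

theorem pvReplaceGo (fuel : Nat) (l acc : List Char) (h : l.length ≤ fuel) :
    PySem.Chars.replace.go ['-'] [' '] fuel l acc
      = acc.reverse ++ l.map (fun c => if c = '-' then ' ' else c) := by
  induction fuel generalizing l acc with
  | zero =>
    have : l = [] := by cases l <;> simp_all
    subst this; simp [PySem.Chars.replace.go]
  | succ n ih =>
    cases l with
    | nil => simp [PySem.Chars.replace.go]
    | cons c t =>
      rw [PySem.Chars.replace.go]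
      by_cases hc : c = '-'
      · subst hc
        rw [if_pos (by simp [List.isPrefixOf])]
        simp only [List.length_cons] at h
        rw [ih _ _ (by simp; omega)]
        simp
      · rw [if_neg (by simp [List.isPrefixOf]; exact fun e => hc e.symm)]
        simp only [List.length_cons] at h
        rw [ih _ _ (by omega)]
        simp [hc]

theorem pvSplitGo (fuel : Nat) (l cur : List Char) (acc : List (List Char)) (h : l.length ≤ fuel) :
    PySem.Chars.splitOn.go [' '] fuel l cur acc = acc.reverse ++ pvSp cur.reverse l := by
  induction fuel generalizing l cur acc with
  | zero =>
    have : l = [] := by cases l <;> simp_all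
    subst this; simp [PySem.Chars.splitOn.go, pvSp]
  | succ n ih =>
    cases l with
    | nil => simp [PySem.Chars.splitOn.go, pvSp]
    | cons c t =>
      rw [PySem.Chars.splitOn.go]
      simp only [List.length_cons] at h
      by_cases hc : c = ' '
      · subst hc
        rw [if_pos (by simp [List.isPrefixOf])]
        rw [ih _ _ _ (by simp; omega)]
        simp [pvSp]
      · rw [if_neg (by simp [List.isPrefixOf]; exact fun e => hc e.symm)]
        rw [ih _ _ _ (by omega)]
        simp [pvSp, hc]

theorem pvSp_ne_nil (w : List Char) (l : List Char) : pvSp w l ≠ [] := by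
  induction l generalizing w with
  | nil => simp [pvSp]
  | cons c t ih => simp only [pvSp]; split <;> simp [ih]

-- B's tokenizer, on the char level, produces exactly A's completed words
theorem pvTok_B (cs : List Char) (w : List Char) :
    ((pvSp w (cs.map (fun c => if c = '-' then ' ' else c))).dropLast.filter (fun x => decide (x ≠ []))).map String.ofList
      = pvToks w cs := by
  induction cs generalizing w with
  | nil => simp [pvSp, pvToks]
  | cons c t ih =>
    by_cases h : c = ' ' ∨ c = '-'
    · have hm : (if c = '-' then ' ' else c) = ' ' := by rcases h with h | h <;> simp [h]
      simp only [List.map_cons, hm, pvSp, if_true, pvToks, if_pos h]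
      rw [List.dropLast_cons_of_ne_nil (pvSp_ne_nil _ _)]
      by_cases hw : w = [] <;> simpa [hw] using ih []
    · rw [not_or] at h
      have hm : (if c = '-' then ' ' else c) = c := by simp [h.2]
      simp only [List.map_cons, hm, pvSp, if_neg h.1, pvToks, if_neg (by tauto : ¬(c = ' ' ∨ c = '-'))]
      exact ih (w ++ [c])

-- B's word list, at the String level
theorem pvWords_B (s : String) :
    ((PySem.List.slice ((PySem.Str.split? (PySem.Str.replace s "-" " ") " ").getD []) none (some (-1))).filter
      (fun w => decide (w ≠ ""))) = pvToks [] s.toList := by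
  have hrep : (PySem.Str.replace s "-" " ").toList
      = s.toList.map (fun c => if c = '-' then ' ' else c) := by
    rw [PySem.Str.toList_replace]
    show PySem.Chars.replace _ _ _ = _
    rw [PySem.Chars.replace]
    simp only [show "-".toList = ['-'] from rfl, show " ".toList = [' '] from rfl]
    rw [if_neg (by simp)]
    rw [pvReplaceGo _ _ _ (by simp)]
    simp
  obtain ⟨X, hX⟩ : ∃ X, PySem.Str.split? (PySem.Str.replace s "-" " ") " " = some X := by
    unfold PySem.Str.split?
    rw [PySem.Chars.split?, if_neg (by simp)]
    simp
  have hmap : X.map String.toList = pvSp [] (s.toList.map (fun c => if c = '-' then ' ' else c)) := by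
    have := PySem.Str.split?_map (PySem.Str.replace s "-" " ") " "
    rw [hX] at this
    simp only [Option.map_some] at this
    rw [PySem.Chars.split?] at this
    rw [if_neg (by simp)] at this
    rw [PySem.Chars.splitOn] at this
    simp only [show " ".toList = [' '] from rfl] at this
    rw [pvSplitGo _ _ _ _ (by omega)] at this
    simpa [hrep] using this
  rw [hX]
  rw [← pvTok_B s.toList []]
  rw [PySem.List.slice_to_neg_one]
  simp only [Option.getD_some]
  rw [← hmap]
  rw [← List.map_dropLast]
  rw [List.filter_map]
  rw [List.map_map]
  have : (List.filter ((fun x => decide (x ≠ [])) ∘ String.toList) X.dropLast)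
       = List.filter (fun w => decide (w ≠ "")) X.dropLast := by
    apply List.filter_congr; intro x _
    simp [Function.comp, String.toList_eq_nil_iff]
  rw [this]
  have : String.ofList ∘ String.toList = id := by
    funext x; simp
  rw [this, List.map_id]

-- ===== VERDICT (by name: the statement is the Claim_ definition above) =====
theorem build_trigram_dict_spec : Claim_equal_build_trigram_dict := by
  intro s _
  unfold Spec_build_trigram_dict build_trigram_dict build_trigram_dict_alt
  rw [show ((((PySem.Dict.empty, none, none, 0), "") :
        (PySem.Dict String (List String) × Option String × Option String × Int) × String))
      = (((PySem.Dict.empty, none, none, 0), String.ofList [])) from by simp]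
  rw [pvCharFold_eq_wfold]
  rw [pvWfold_start]
  rw [pvWords_B]
  have h1 : ∀ (xs : List String), PySem.List.slice xs (some (1 : Int)) none = xs.drop 1 := fun xs => by
    simpa using PySem.List.slice_from (xs := xs) (a := 1) (by norm_num)
  have h2 : ∀ (xs : List String), PySem.List.slice xs (some (2 : Int)) none = xs.drop 2 := fun xs => by
    simpa using PySem.List.slice_from (xs := xs) (a := 2) (by norm_num)
  simp only [h1, h2, pvZipFold_eq_win]
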